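-- pv_equiv track=rewrite | github.com/aturfah/poke2vec | generate_teams.py | team_validity_check
-- ===== SOURCE A (Python) =====
-- def team_validity_check(team):
--     # Species Clause Heuristics
--     invalid_team = False
--
--     # TODO: Garchomp + Garchomp-Mega Can't Occur
--     # TODO: See if can mix this with regional forms
--
--     team_members = set()
--     mega_present = False
--     rotom_present = False
--     greninja_present = False
--     gourgeist_present = False
--     therian_incarnate = set()
--     for x in team:
--         if x in team_members:
--             invalid_team = True
--             break
--         team_members.add(x)
--
--         if "-mega" in x.lower() and mega_present is False:
--             mega_present = True
--         elif "-mega" in x.lower() and mega_present is True: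
--             invalid_team = True
--             break
--
--         if "greninja" in x.lower() and greninja_present is False:
--             greninja_present = True
--         elif "greninja" in x.lower() and greninja_present is True:
--             invalid_team = True
--             break
--
--         if x.lower() in ["thundurus", "thundurus-therian", "landorus", "landorus-therian", "tornadus", "tornadus-therian"]:
--             if x in therian_incarnate:
--                 invalid_team = True
--                 break
--             elif "-" in x:
--                 therian_incarnate.add(x)
--                 therian_incarnate.add(x.split("-")[0])
--             else:
--                 therian_incarnate.add(x)
--                 therian_incarnate.add("{}-Therian".format(x))
--
--         if "rotom" in x.lower() and rotom_present is False:
--             rotom_present = True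
--         elif "rotom" in x.lower() and rotom_present is True:
--             invalid_team = True
--             break
--
--         if "gourgeist" in x.lower() and gourgeist_present is False:
--             gourgeist_present = True
--         elif "gourgeist" in x.lower() and gourgeist_present is True:
--             invalid_team = True
--             break
--
--     return not invalid_team
-- ===== SOURCE B (Python) =====
-- THERIAN_NAMES = {"thundurus", "thundurus-therian", "landorus", "landorus-therian",
--                  "tornadus", "tornadus-therian"}
--
-- def _therian_key(x):
--     # the alternate form A would also reject: base form <-> Therian form, original case kept
--     return x.split("-")[0] if "-" in x else x + "-Therian"
--
-- def team_validity_check(team):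
--     if len(set(team)) != len(team):
--         return False
--     lows = [x.lower() for x in team]
--     for sub in ("-mega", "greninja", "rotom", "gourgeist"):
--         if sum(1 for lx in lows if sub in lx) > 1:
--             return False
--     therians = [x for x in team if x.lower() in THERIAN_NAMES]
--     for i, x in enumerate(therians):
--         key = _therian_key(x)
--         if any(y == key for y in therians[i + 1:]):
--             return False
--     return True
-- ===== Notes on version B (the rewrite author's own statement) =====
-- stated objective: simpler
-- what changed: Replaces A's single stateful early-breaking loop (duplicate set, four presence flags, incrementally built therian-key set) by independent clauses combined by early returns: len(set(team))==len(team) for duplicates, a count<=1 per special substring, and a pairwise later-member-vs-key scan over the filtered therian members.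
import Mathlib
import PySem

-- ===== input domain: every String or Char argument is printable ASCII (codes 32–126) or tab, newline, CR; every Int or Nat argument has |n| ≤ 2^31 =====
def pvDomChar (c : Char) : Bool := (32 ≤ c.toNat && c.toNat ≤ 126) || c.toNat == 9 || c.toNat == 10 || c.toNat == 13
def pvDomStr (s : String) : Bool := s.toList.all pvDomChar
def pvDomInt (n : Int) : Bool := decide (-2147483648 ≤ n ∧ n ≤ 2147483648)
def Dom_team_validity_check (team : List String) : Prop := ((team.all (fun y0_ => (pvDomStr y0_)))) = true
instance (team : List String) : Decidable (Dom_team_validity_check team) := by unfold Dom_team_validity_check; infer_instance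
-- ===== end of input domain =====

-- B replaces A's single stateful early-breaking loop by independent clause checks (dedup length,
-- per-substring counts, pairwise therian-key scan over the filtered list); objective: simpler decomposition.

-- the literal list of therian/incarnate names both Pythons use
def therNames : List String :=
  ["thundurus", "thundurus-therian", "landorus", "landorus-therian", "tornadus", "tornadus-therian"]

-- ===== PORT A =====
-- state: team_members, mega/greninja/rotom/gourgeist flags, therian_incarnate; `true` = invalid_team
-- (x.split("-")[0] is ported via split?/getD/headD: the separator "-" is nonempty so split? is `some`
-- of a nonempty list — exact; "{}-Therian".format(x) is ported as join "" [x, "-Therian"] — exact)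
def loopA (rest : List String) (members : PySem.Set String)
    (mega gren rotom gourg : Bool) (ther : PySem.Set String) : Bool :=
  match rest with
  | [] => false
  | x :: r =>
    if PySem.Set.contains members x then true
    else if PySem.Str.isIn "-mega" (PySem.Str.lower x) && mega then true
    else if PySem.Str.isIn "greninja" (PySem.Str.lower x) && gren then true
    else if therNames.contains (PySem.Str.lower x) && PySem.Set.contains ther x then true
    else if PySem.Str.isIn "rotom" (PySem.Str.lower x) && rotom then true
    else if PySem.Str.isIn "gourgeist" (PySem.Str.lower x) && gourg then true
    else loopA r (PySem.Set.add members x)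
      (mega || PySem.Str.isIn "-mega" (PySem.Str.lower x))
      (gren || PySem.Str.isIn "greninja" (PySem.Str.lower x))
      (rotom || PySem.Str.isIn "rotom" (PySem.Str.lower x))
      (gourg || PySem.Str.isIn "gourgeist" (PySem.Str.lower x))
      (if therNames.contains (PySem.Str.lower x) then
        (if PySem.Str.isIn "-" x then
          PySem.Set.add (PySem.Set.add ther x) (((PySem.Str.split? x "-").getD []).headD "")
        else
          PySem.Set.add (PySem.Set.add ther x) (PySem.Str.join "" [x, "-Therian"]))
       else ther)

def team_validity_check (team : List String) : Bool :=
  !(loopA team PySem.Set.empty false false false false PySem.Set.empty)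

-- ===== PORT B =====
def therianKey (x : String) : String :=
  if PySem.Str.isIn "-" x then ((PySem.Str.split? x "-").getD []).headD ""
  else PySem.Str.join "" [x, "-Therian"]

def therianConflict : List String → Bool
  | [] => false
  | x :: r => r.any (fun y => y == therianKey x) || therianConflict r

def team_validity_check_alt (team : List String) : Bool :=
  if (PySem.Set.ofList team).length ≠ team.length then false
  else
    let lows := team.map PySem.Str.lower
    if ["-mega", "greninja", "rotom", "gourgeist"].any
        (fun sub => 1 < lows.countP (fun lx => PySem.Str.isIn sub lx)) then false
    else if therianConflict (team.filter (fun x => therNames.contains (PySem.Str.lower x))) then false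
    else true

-- ===== PRECONDITION & SPEC =====
def Spec_team_validity_check (team : List String) (out : Bool) : Prop := out = team_validity_check_alt team
instance (team : List String) (out : Bool) : Decidable (Spec_team_validity_check team out) := by unfold Spec_team_validity_check; infer_instance

-- ===== CLAIM (what is proved, stated in full; the proofs are below) =====
def Claim_equal_team_validity_check : Prop := ∀ (team : List String), Dom_team_validity_check team → Spec_team_validity_check team (team_validity_check team)

-- ===== LEMMAS AND PROOFS =====

def b2n (b : Bool) : Nat := if b then 1 else 0

def subCount (sub : String) (l : List String) : Nat :=
  l.countP (fun x => PySem.Str.isIn sub (PySem.Str.lower x))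

def therOK (T : PySem.Set String) : List String → Bool
  | [] => true
  | x :: r =>
    if therNames.contains (PySem.Str.lower x) then
      !(PySem.Set.contains T x) && therOK (PySem.Set.add (PySem.Set.add T x) (therianKey x)) r
    else therOK T r

lemma b2n_le_one (b : Bool) : b2n b ≤ 1 := by cases b <;> simp [b2n]

lemma contains_add_false (M : PySem.Set String) (x y : String) :
    PySem.Set.contains (PySem.Set.add M x) y = false ↔
      PySem.Set.contains M y = false ∧ y ≠ x := by
  rw [Bool.eq_false_iff, Bool.eq_false_iff]
  simp only [ne_eq, PySem.Set.contains_iff, PySem.Set.mem_add]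
  tauto

lemma fresh_nodup_iff (M : PySem.Set String) (x : String) (r : List String)
    (h1 : PySem.Set.contains M x = false) :
    ((∀ y ∈ r, PySem.Set.contains (PySem.Set.add M x) y = false) ∧ r.Nodup) ↔
      ((∀ y ∈ x :: r, PySem.Set.contains M y = false) ∧ (x :: r).Nodup) := by
  simp only [contains_add_false, List.nodup_cons, List.mem_cons]
  constructor
  · rintro ⟨h, hr⟩
    refine ⟨?_, ?_, hr⟩
    · rintro y (rfl | hy)
      · exact h1
      · exact (h y hy).1
    · intro hx; exact (h x hx).2 rfl
  · rintro ⟨h, hx, hr⟩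
    exact ⟨fun y hy => ⟨h y (Or.inr hy), fun hyx => hx (hyx ▸ hy)⟩, hr⟩

lemma cnt_iff (sub x : String) (r : List String) (f : Bool)
    (hf : ¬(PySem.Str.isIn sub (PySem.Str.lower x) && f) = true) :
    (subCount sub r + b2n (f || PySem.Str.isIn sub (PySem.Str.lower x)) ≤ 1 ↔
      subCount sub (x :: r) + b2n f ≤ 1) := by
  simp only [subCount, List.countP_cons, PySem.Str.isIn_eq, PySem.Str.toList_lower] at hf ⊢
  cases hc : PySem.Chars.isIn sub.toList (PySem.Chars.lower x.toList) <;> cases f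
  · simp [b2n]
  · simp [b2n]
  · simp [b2n]
  · exact absurd (by simp [hc]) hf

lemma count_ge_two (sub x : String) (r : List String)
    (hc : PySem.Str.isIn sub (PySem.Str.lower x) = true) :
    ¬(subCount sub (x :: r) + 1 ≤ 1) := by
  have hc' : PySem.Chars.isIn sub.toList (PySem.Chars.lower x.toList) = true := by simpa using hc
  simp [subCount, hc']

lemma therOK_cons_pos_dash (x : String) (r : List String) (T : PySem.Set String)
    (h7 : therNames.contains (PySem.Str.lower x) = true)
    (h8 : PySem.Str.isIn "-" x = true)
    (hTx : PySem.Set.contains T x = false) :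
    therOK T (x :: r) =
      therOK (PySem.Set.add (PySem.Set.add T x) (((PySem.Str.split? x "-").getD []).headD "")) r := by
  have hm : PySem.Str.lower x ∈ therNames := by simpa using h7
  have hx : ¬ x ∈ T := by simpa using hTx
  have hd : PySem.Chars.isIn ['-'] x.toList = true := by simpa using h8
  simp [therOK, therianKey, hm, hx, hd]

lemma therOK_cons_pos_nodash (x : String) (r : List String) (T : PySem.Set String)
    (h7 : therNames.contains (PySem.Str.lower x) = true)
    (h8 : PySem.Str.isIn "-" x = false)
    (hTx : PySem.Set.contains T x = false) :
    therOK T (x :: r) =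
      therOK (PySem.Set.add (PySem.Set.add T x) (PySem.Str.join "" [x, "-Therian"])) r := by
  have hm : PySem.Str.lower x ∈ therNames := by simpa using h7
  have hx : ¬ x ∈ T := by simpa using hTx
  have hd : PySem.Chars.isIn ['-'] x.toList = false := by simpa using h8
  simp [therOK, therianKey, hm, hx, hd]

lemma therOK_cons_neg (x : String) (r : List String) (T : PySem.Set String)
    (h7 : therNames.contains (PySem.Str.lower x) = false) :
    therOK T (x :: r) = therOK T r := by
  have hm : ¬ PySem.Str.lower x ∈ therNames := by simpa using h7
  simp [therOK, hm]

lemma loopA_false_iff (rest : List String) : ∀ (M : PySem.Set String) (mega gren rotom gourg : Bool)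
    (T : PySem.Set String),
    loopA rest M mega gren rotom gourg T = false ↔
      ((∀ x ∈ rest, PySem.Set.contains M x = false) ∧ rest.Nodup)
      ∧ subCount "-mega" rest + b2n mega ≤ 1
      ∧ subCount "greninja" rest + b2n gren ≤ 1
      ∧ subCount "rotom" rest + b2n rotom ≤ 1
      ∧ subCount "gourgeist" rest + b2n gourg ≤ 1
      ∧ therOK T rest = true := by
  induction rest with
  | nil => intro M mega gren rotom gourg T; simp [loopA, subCount, therOK, b2n_le_one]
  | cons x r ih =>
    intro M mega gren rotom gourg T
    simp only [loopA]
    split_ifs with h1 h2 h3 h4 h5 h6 h7 h8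
    · refine iff_of_false (by simp) ?_
      rintro ⟨⟨hfresh, -⟩, -⟩
      exact absurd (hfresh x (by simp)) (by simpa using h1)
    · refine iff_of_false (by simp) ?_
      rintro ⟨-, hm, -⟩
      simp only [Bool.and_eq_true] at h2
      exact count_ge_two "-mega" x r h2.1 (by simpa [h2.2, b2n] using hm)
    · refine iff_of_false (by simp) ?_
      rintro ⟨-, -, hm, -⟩
      simp only [Bool.and_eq_true] at h3
      exact count_ge_two "greninja" x r h3.1 (by simpa [h3.2, b2n] using hm)
    · refine iff_of_false (by simp) ?_
      rintro ⟨-, -, -, -, -, ht⟩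
      simp only [Bool.and_eq_true] at h4
      have hm : PySem.Str.lower x ∈ therNames := by simpa using h4.1
      have hx : x ∈ T := by simpa using h4.2
      simp [therOK, hm, hx] at ht
    · refine iff_of_false (by simp) ?_
      rintro ⟨-, -, -, hm, -⟩
      simp only [Bool.and_eq_true] at h5
      exact count_ge_two "rotom" x r h5.1 (by simpa [h5.2, b2n] using hm)
    · refine iff_of_false (by simp) ?_
      rintro ⟨-, -, -, -, hm, -⟩
      simp only [Bool.and_eq_true] at h6
      exact count_ge_two "gourgeist" x r h6.1 (by simpa [h6.2, b2n] using hm)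
    · -- therian member with a dash
      rw [Bool.not_eq_true] at h1
      have hTx : PySem.Set.contains T x = false := by
        cases hc : PySem.Set.contains T x
        · rfl
        · exact absurd (by rw [h7, hc]; rfl) h4
      rw [ih, ← therOK_cons_pos_dash x r T h7 h8 hTx, fresh_nodup_iff M x r h1,
        cnt_iff "-mega" x r mega h2, cnt_iff "greninja" x r gren h3,
        cnt_iff "rotom" x r rotom h5, cnt_iff "gourgeist" x r gourg h6]
    · -- therian member without a dash
      rw [Bool.not_eq_true] at h1 h8
      have hTx : PySem.Set.contains T x = false := by
        cases hc : PySem.Set.contains T x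
        · rfl
        · exact absurd (by rw [h7, hc]; rfl) h4
      rw [ih, ← therOK_cons_pos_nodash x r T h7 h8 hTx, fresh_nodup_iff M x r h1,
        cnt_iff "-mega" x r mega h2, cnt_iff "greninja" x r gren h3,
        cnt_iff "rotom" x r rotom h5, cnt_iff "gourgeist" x r gourg h6]
    · -- not a therian member
      rw [Bool.not_eq_true] at h1 h7
      rw [ih, ← therOK_cons_neg x r T h7, fresh_nodup_iff M x r h1,
        cnt_iff "-mega" x r mega h2, cnt_iff "greninja" x r gren h3,
        cnt_iff "rotom" x r rotom h5, cnt_iff "gourgeist" x r gourg h6]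

lemma ther_bridge (rest : List String) : ∀ (T : PySem.Set String) (p : List String),
    (∀ y ∈ rest, y ∉ p) → rest.Nodup →
    (∀ y, PySem.Set.contains T y = true ↔ y ∈ p ∨ ∃ z ∈ p, y = therianKey z) →
    (therOK T rest = true ↔
      (∀ z ∈ p, ∀ y ∈ rest.filter (fun x => therNames.contains (PySem.Str.lower x)), y ≠ therianKey z)
      ∧ therianConflict (rest.filter (fun x => therNames.contains (PySem.Str.lower x))) = false) := by
  induction rest with
  | nil => intro T p hfr hnd hchar; simp [therOK, therianConflict]
  | cons x r ih =>
    intro T p hfr hnd hchar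
    rcases List.nodup_cons.mp hnd with ⟨hxr, hndr⟩
    by_cases hth : therNames.contains (PySem.Str.lower x) = true
    · have hm : PySem.Str.lower x ∈ therNames := by simpa using hth
      have hxp : x ∉ p := hfr x (by simp)
      have hchar' : ∀ y, PySem.Set.contains (PySem.Set.add (PySem.Set.add T x) (therianKey x)) y = true ↔
          y ∈ p ++ [x] ∨ ∃ z ∈ p ++ [x], y = therianKey z := by
        intro y
        simp only [PySem.Set.contains_iff, PySem.Set.mem_add, List.mem_append, List.mem_singleton]
        rw [← PySem.Set.contains_iff, hchar y]
        constructor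
        · rintro ((h | h) | h)
          · rcases h with h | ⟨z, hz, hk⟩
            · exact Or.inl (Or.inl h)
            · exact Or.inr ⟨z, Or.inl hz, hk⟩
          · exact Or.inl (Or.inr h)
          · exact Or.inr ⟨x, Or.inr rfl, h⟩
        · rintro ((h | h) | ⟨z, hz | rfl, hk⟩)
          · exact Or.inl (Or.inl (Or.inl h))
          · exact Or.inl (Or.inr h)
          · exact Or.inl (Or.inl (Or.inr ⟨z, hz, hk⟩))
          · exact Or.inr hk
      have hfr' : ∀ y ∈ r, y ∉ p ++ [x] := by
        intro y hy
        simp only [List.mem_append, List.mem_singleton]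
        rintro (h | rfl)
        · exact hfr y (by simp [hy]) h
        · exact hxr hy
      have hstep : therOK T (x :: r) =
          (!(PySem.Set.contains T x) && therOK (PySem.Set.add (PySem.Set.add T x) (therianKey x)) r) := by
        simp [therOK, hm]
      rw [hstep, List.filter_cons_of_pos (by simpa using hth)]
      simp only [Bool.and_eq_true, Bool.not_eq_true']
      rw [ih _ _ hfr' hndr hchar']
      have hTx : (PySem.Set.contains T x = false) ↔ (∀ z ∈ p, x ≠ therianKey z) := by
        rw [Bool.eq_false_iff]
        constructor
        · intro h z hz hk
          exact h ((hchar x).mpr (Or.inr ⟨z, hz, hk⟩))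
        · intro h hc
          rcases (hchar x).mp hc with hp | ⟨z, hz, hk⟩
          · exact hxp hp
          · exact h z hz hk
      rw [hTx]
      simp only [therianConflict, Bool.or_eq_false_iff, List.any_eq_false, beq_iff_eq,
        List.forall_mem_append, List.forall_mem_singleton, List.forall_mem_cons]
      constructor
      · rintro ⟨hA1, ⟨hB1, hB2⟩, hC⟩
        exact ⟨fun z hz => ⟨hA1 z hz, hB1 z hz⟩, hB2, hC⟩
      · rintro ⟨hR1, hR2, hC⟩
        exact ⟨fun z hz => (hR1 z hz).1, ⟨fun z hz => (hR1 z hz).2, hR2⟩, hC⟩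
    · have hth' : therNames.contains (PySem.Str.lower x) = false := by simpa using hth
      rw [therOK_cons_neg x r T hth', List.filter_cons_of_neg (by simpa using hth)]
      exact ih T p (fun y hy => hfr y (by simp [hy])) hndr hchar

lemma ofList_length_iff (xs : List String) : (PySem.Set.ofList xs).length = xs.length ↔ xs.Nodup := by
  induction xs using List.reverseRecOn with
  | nil => simp
  | append_singleton xs x ih =>
    rw [PySem.Set.ofList_append_singleton]
    by_cases hx : x ∈ PySem.Set.ofList xs
    · rw [PySem.Set.add_of_mem hx]
      have hle := PySem.Set.length_ofList_le (xs := xs)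
      refine iff_of_false (by simp only [List.length_append, List.length_singleton]; omega) ?_
      intro h
      rw [List.nodup_append] at h
      exact h.2.2 x ((PySem.Set.mem_ofList xs x).mp hx) x (by simp) rfl
    · rw [PySem.Set.add_of_not_mem hx]
      have hx' : x ∉ xs := fun h => hx ((PySem.Set.mem_ofList xs x).mpr h)
      rw [List.nodup_append]
      simp only [List.length_append, List.length_singleton]
      constructor
      · intro h
        exact ⟨ih.mp (by omega), List.nodup_singleton x,
          fun a ha b hb hab => hx' (List.mem_singleton.mp hb ▸ (hab ▸ ha))⟩
      · rintro ⟨h1, -, -⟩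
        have := ih.mpr h1
        omega

lemma countP_lower_eq (sub : String) (team : List String) :
    (team.map PySem.Str.lower).countP (fun lx => PySem.Str.isIn sub lx) = subCount sub team := by
  simp [subCount, List.countP_map, Function.comp_def]

-- ===== VERDICT (by name: the statement is the Claim_ definition above) =====
theorem team_validity_check_spec : Claim_equal_team_validity_check := by
  unfold Claim_equal_team_validity_check
  intro team _
  unfold Spec_team_validity_check
  rw [Bool.eq_iff_iff]
  have hA : team_validity_check team = true ↔
      (team.Nodup ∧ subCount "-mega" team ≤ 1 ∧ subCount "greninja" team ≤ 1 ∧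
       subCount "rotom" team ≤ 1 ∧ subCount "gourgeist" team ≤ 1 ∧
       therOK PySem.Set.empty team = true) := by
    unfold team_validity_check
    rw [Bool.not_eq_true', loopA_false_iff]
    simp [b2n, PySem.Set.empty]
  have hB : team_validity_check_alt team = true ↔
      ((PySem.Set.ofList team).length = team.length ∧
       (∀ sub ∈ (["-mega", "greninja", "rotom", "gourgeist"] : List String),
          ¬ 1 < (team.map PySem.Str.lower).countP (fun lx => PySem.Str.isIn sub lx)) ∧
       therianConflict (team.filter (fun x => therNames.contains (PySem.Str.lower x))) = false) := by
    simp only [team_validity_check_alt]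
    split_ifs with g1 g2 g3
    · exact iff_of_false (by simp) (fun h => g1 h.1)
    · refine iff_of_false (by simp) (fun h => ?_)
      simp only [List.any_eq_true, decide_eq_true_eq] at g2
      rcases g2 with ⟨sub, hs, hlt⟩
      exact h.2.1 sub hs hlt
    · refine iff_of_false (by simp) (fun h => ?_)
      exact Bool.false_ne_true (h.2.2 ▸ g3)
    · refine iff_of_true rfl ⟨not_ne_iff.mp g1, ?_, by simpa using g3⟩
      intro sub hs hlt
      exact g2 (by simp only [List.any_eq_true, decide_eq_true_eq]; exact ⟨sub, hs, hlt⟩)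
  rw [hA, hB, ofList_length_iff]
  constructor
  · rintro ⟨hN, h1, h2, h3, h4, hT⟩
    refine ⟨hN, ?_, ?_⟩
    · intro sub hs
      rw [Nat.not_lt, countP_lower_eq]
      rcases (by simpa using hs : sub = "-mega" ∨ sub = "greninja" ∨ sub = "rotom" ∨ sub = "gourgeist") with rfl | rfl | rfl | rfl
      · exact h1
      · exact h2
      · exact h3
      · exact h4
    · exact ((ther_bridge team PySem.Set.empty [] (by simp) hN (by simp)).mp hT).2
  · rintro ⟨hN, hcnt, hconf⟩
    refine ⟨hN, ?_, ?_, ?_, ?_, ?_⟩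
    · have := hcnt "-mega" (by simp); rwa [Nat.not_lt, countP_lower_eq] at this
    · have := hcnt "greninja" (by simp); rwa [Nat.not_lt, countP_lower_eq] at this
    · have := hcnt "rotom" (by simp); rwa [Nat.not_lt, countP_lower_eq] at this
    · have := hcnt "gourgeist" (by simp); rwa [Nat.not_lt, countP_lower_eq] at this
    · exact (ther_bridge team PySem.Set.empty [] (by simp) hN (by simp)).mpr ⟨by simp, hconf⟩
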